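-- pv_equiv track=rewrite | github.com/HmonWutt/data_structures_algorithms | maximise_gap_3440.py | make_top_three
-- ===== SOURCE A (Python) =====
-- def make_top_three(eventTime, startTime, endTime):
--     top_three_gaps = [(-1, -1), (-1, -1), (-1, -1)]
--     startTime.append(eventTime)
--     endTime.append(eventTime)
--     for i in range(len(startTime)):
--         if i == 0:
--             gap = startTime[i] - 0
--         else:
--             gap = startTime[i]-endTime[i-1]
--
--         for place in range(2, -1, -1):
--             if gap > top_three_gaps[place][0]:
--                 top_three_gaps[place] = (gap, i)
--                 break
--         for place in range(2, 0, -1):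
--             if top_three_gaps[place-1][0] < top_three_gaps[place][0]:
--                 tmp = top_three_gaps[place]
--                 top_three_gaps[place] = top_three_gaps[place-1]
--                 top_three_gaps[place - 1] = tmp
--
--     return top_three_gaps
-- ===== SOURCE B (Python) =====
-- def make_top_three(eventTime, startTime, endTime):
--     # Collect all gaps, then select the top three by one stable sort on -gap,
--     # instead of maintaining a 3-slot buffer with insert/bubble passes.
--     startTime.append(eventTime)
--     endTime.append(eventTime)
--     gaps = []
--     for i in range(len(startTime)):
--         if i == 0:
--             gaps.append((startTime[i] - 0, i))
--         else:
--             gaps.append((startTime[i] - endTime[i - 1], i))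
--     candidates = sorted([p for p in gaps if p[0] > -1], key=lambda p: -p[0])[:3]
--     return candidates + [(-1, -1)] * (3 - len(candidates))
-- ===== Notes on version B (the rewrite author's own statement) =====
-- stated objective: simpler
-- what changed: Replaces A's streaming 3-slot buffer maintained by an unrolled insert-and-bubble pass per gap with collecting all (gap, index) pairs, one stable sort on -gap of those exceeding -1, and taking the first three padded with (-1,-1).
import Mathlib
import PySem

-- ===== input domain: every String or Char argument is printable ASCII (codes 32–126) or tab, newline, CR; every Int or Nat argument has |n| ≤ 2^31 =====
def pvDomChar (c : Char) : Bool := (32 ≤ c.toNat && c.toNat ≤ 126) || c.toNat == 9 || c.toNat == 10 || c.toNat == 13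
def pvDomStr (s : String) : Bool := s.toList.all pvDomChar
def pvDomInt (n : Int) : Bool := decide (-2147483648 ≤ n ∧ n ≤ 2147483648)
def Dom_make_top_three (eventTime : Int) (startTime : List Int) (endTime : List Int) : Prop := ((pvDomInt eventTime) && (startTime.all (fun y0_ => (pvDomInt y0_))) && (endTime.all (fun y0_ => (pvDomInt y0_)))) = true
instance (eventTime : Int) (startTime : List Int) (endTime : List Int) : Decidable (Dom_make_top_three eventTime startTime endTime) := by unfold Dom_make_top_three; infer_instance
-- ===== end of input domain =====

-- B replaces A's hand-maintained 3-slot insert/bubble buffer by collecting all gaps and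
-- taking the first three of one stable sort on -gap (objective: simpler, not faster).
-- Both Pythons append eventTime to startTime and endTime in place (same mutation);
-- the equivalence proved here is about the return value.

-- ===== PORT A =====
def make_top_three (eventTime : Int) (startTime : List Int) (endTime : List Int) : List (Int × Int) :=
  -- startTime.append(eventTime); endTime.append(eventTime)
  let st := startTime ++ [eventTime]
  let en := endTime ++ [eventTime]
  -- for i in range(len(startTime)): … (state: the 3-slot list, a triple of pairs;
  -- the two inner loops run over the literal indices 2,1,0 resp. 2,1 with the break
  -- unrolled as the if-chain below)
  let t :=
    (PySem.List.pyRange 0 (st.length : Int) 1).foldl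
      (fun t i =>
        let gap : Int :=
          if i == 0 then PySem.List.pyGetD st i 0 - 0
          else PySem.List.pyGetD st i 0 - PySem.List.pyGetD en (i - 1) 0
        -- for place in range(2, -1, -1): if gap > top[place][0]: top[place] = (gap,i); break
        let t :=
          if gap > t.2.2.1 then (t.1, t.2.1, (gap, i))
          else if gap > t.2.1.1 then (t.1, (gap, i), t.2.2)
          else if gap > t.1.1 then ((gap, i), t.2.1, t.2.2)
          else t
        -- for place in range(2, 0, -1): conditional swap of top[place-1], top[place]
        let t := if t.2.1.1 < t.2.2.1 then (t.1, t.2.2, t.2.1) else t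
        let t := if t.1.1 < t.2.1.1 then (t.2.1, t.1, t.2.2) else t
        t)
      (((-1 : Int), (-1 : Int)), ((-1 : Int), (-1 : Int)), ((-1 : Int), (-1 : Int)))
  [t.1, t.2.1, t.2.2]

-- ===== PORT B =====
def make_top_three_alt (eventTime : Int) (startTime : List Int) (endTime : List Int) : List (Int × Int) :=
  let st := startTime ++ [eventTime]
  let en := endTime ++ [eventTime]
  -- gaps = []; for i in range(len(startTime)): gaps.append((…, i))
  let gaps :=
    (PySem.List.pyRange 0 (st.length : Int) 1).foldl
      (fun acc i =>
        acc ++ [((if i == 0 then PySem.List.pyGetD st i 0 - 0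
                  else PySem.List.pyGetD st i 0 - PySem.List.pyGetD en (i - 1) 0), i)])
      []
  -- candidates = sorted([p for p in gaps if p[0] > -1], key=lambda p: -p[0])[:3]
  let candidates :=
    (PySem.List.sorted (gaps.filter (fun p => decide (p.1 > -1))) (fun p => -p.1) false).take 3
  -- return candidates + [(-1, -1)] * (3 - len(candidates))
  candidates ++ List.replicate (3 - candidates.length) ((-1 : Int), (-1 : Int))

-- ===== PRECONDITION & SPEC =====
-- Pre_ excludes exactly the inputs on which Python A raises IndexError
-- (endTime[i-1] out of range, i.e. startTime longer than endTime plus one).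
def Pre_make_top_three (eventTime : Int) (startTime : List Int) (endTime : List Int) : Prop :=
  startTime.length ≤ endTime.length + 1
instance (eventTime : Int) (startTime : List Int) (endTime : List Int) : Decidable (Pre_make_top_three eventTime startTime endTime) := by unfold Pre_make_top_three; infer_instance

def pvWitness_make_top_three : Int × List Int × List Int := (10, [1, 3], [2, 5])

def Spec_make_top_three (eventTime : Int) (startTime : List Int) (endTime : List Int) (out : List (Int × Int)) : Prop := out = make_top_three_alt eventTime startTime endTime
instance (eventTime : Int) (startTime : List Int) (endTime : List Int) (out : List (Int × Int)) : Decidable (Spec_make_top_three eventTime startTime endTime out) := by unfold Spec_make_top_three; infer_instance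

-- ===== CLAIM (what is proved, stated in full; the proofs are below) =====
def Claim_equal_make_top_three : Prop := ∀ (eventTime : Int) (startTime : List Int) (endTime : List Int), Dom_make_top_three eventTime startTime endTime → Pre_make_top_three eventTime startTime endTime → Spec_make_top_three eventTime startTime endTime (make_top_three eventTime startTime endTime)

-- ===== LEMMAS AND PROOFS =====

-- A's loop body on the 3-slot triple, as a function of the (gap, i) pair.
def pvStepA (t : (Int × Int) × (Int × Int) × (Int × Int)) (p : Int × Int) :
    (Int × Int) × (Int × Int) × (Int × Int) :=
  let t :=
    if p.1 > t.2.2.1 then (t.1, t.2.1, p)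
    else if p.1 > t.2.1.1 then (t.1, p, t.2.2)
    else if p.1 > t.1.1 then (p, t.2.1, t.2.2)
    else t
  let t := if t.2.1.1 < t.2.2.1 then (t.1, t.2.2, t.2.1) else t
  let t := if t.1.1 < t.2.1.1 then (t.2.1, t.1, t.2.2) else t
  t

-- B's accumulator step: filtered stable insertion (= one step of sorted's insertBy fold).
def pvStepB (l : List (Int × Int)) (p : Int × Int) : List (Int × Int) :=
  if p.1 > -1 then PySem.List.insertBy (fun a b => decide ((-a.1 : Int) < -b.1)) p l else l

-- the first three entries of l, padded with the (-1,-1) sentinel, as a triple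
def pvTripleOf (l : List (Int × Int)) : (Int × Int) × (Int × Int) × (Int × Int) :=
  match l with
  | [] => (((-1 : Int), (-1 : Int)), ((-1 : Int), (-1 : Int)), ((-1 : Int), (-1 : Int)))
  | [x] => (x, ((-1 : Int), (-1 : Int)), ((-1 : Int), (-1 : Int)))
  | [x, y] => (x, y, ((-1 : Int), (-1 : Int)))
  | x :: y :: z :: _ => (x, y, z)

-- invariant of B's accumulator: gaps positive and nonincreasing
def pvInv (l : List (Int × Int)) : Prop :=
  (∀ q ∈ l, q.1 > -1) ∧ l.Pairwise (fun a b => b.1 ≤ a.1)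

theorem pvInv_insertBy (p : Int × Int) (hp : p.1 > -1) :
    ∀ l : List (Int × Int), pvInv l →
      pvInv (PySem.List.insertBy (fun a b => decide ((-a.1 : Int) < -b.1)) p l) := by
  intro l
  induction l with
  | nil =>
    intro _
    constructor
    · intro q hq
      simp only [PySem.List.insertBy, List.mem_singleton] at hq
      subst hq; omega
    · simp [PySem.List.insertBy]
  | cons x xs ih =>
    intro ⟨hpos, hsort⟩
    have hsx := List.pairwise_cons.mp hsort
    simp only [PySem.List.insertBy]
    split_ifs with hb
    · simp only [decide_eq_true_eq] at hb
      refine ⟨?_, ?_⟩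
      · intro q hq
        rcases List.mem_cons.mp hq with hq | hq
        · subst hq; omega
        · exact hpos q hq
      · refine List.pairwise_cons.mpr ⟨?_, hsort⟩
        intro b hb'
        rcases List.mem_cons.mp hb' with hb' | hb'
        · subst hb'; omega
        · have := hsx.1 b hb'; omega
    · simp only [decide_eq_true_eq, not_lt] at hb
      have ih' := ih ⟨fun q hq => hpos q (List.mem_cons_of_mem _ hq), hsx.2⟩
      refine ⟨?_, ?_⟩
      · intro q hq
        rcases List.mem_cons.mp hq with hq | hq
        · exact hq ▸ hpos x List.mem_cons_self
        · exact ih'.1 q hq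
      · refine List.pairwise_cons.mpr ⟨?_, ih'.2⟩
        intro b hb'
        rcases (PySem.List.mem_insertBy _ _ _ _).mp hb' with hb' | hb'
        · subst hb'; omega
        · exact hsx.1 b hb'

theorem pvInv_stepB (l : List (Int × Int)) (p : Int × Int) (h : pvInv l) : pvInv (pvStepB l p) := by
  unfold pvStepB
  split_ifs with hp
  · exact pvInv_insertBy p hp l h
  · exact h

set_option maxHeartbeats 1000000 in
theorem pvStep_eq (l : List (Int × Int)) (p : Int × Int) (h : pvInv l) :
    pvStepA (pvTripleOf l) p = pvTripleOf (pvStepB l p) := by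
  obtain ⟨hpos, hsort⟩ := h
  rcases l with _ | ⟨x, _ | ⟨y, _ | ⟨z, rest⟩⟩⟩
  · simp only [pvStepA, pvStepB, pvTripleOf, PySem.List.insertBy]
    split_ifs <;>
      simp only [pvTripleOf, decide_eq_true_eq, not_lt] at * <;>
      first | rfl | omega
  · have hx := hpos x List.mem_cons_self
    simp only [pvStepA, pvStepB, pvTripleOf, PySem.List.insertBy]
    split_ifs <;>
      simp only [pvTripleOf, decide_eq_true_eq, not_lt] at * <;>
      first | rfl | omega
  · have hx := hpos x List.mem_cons_self
    have hy := hpos y (by simp)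
    have hxy : y.1 ≤ x.1 := by have := (List.pairwise_cons.mp hsort).1 y (by simp); omega
    simp only [pvStepA, pvStepB, pvTripleOf, PySem.List.insertBy]
    split_ifs <;>
      simp only [pvTripleOf, decide_eq_true_eq, not_lt] at * <;>
      first | rfl | omega
  · have hx := hpos x List.mem_cons_self
    have hy := hpos y (by simp)
    have hz := hpos z (by simp)
    have hxy : y.1 ≤ x.1 := by have := (List.pairwise_cons.mp hsort).1 y (by simp); omega
    have hyz : z.1 ≤ y.1 := by
      have := (List.pairwise_cons.mp (List.pairwise_cons.mp hsort).2).1 z (by simp); omega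
    simp only [pvStepA, pvStepB, pvTripleOf, PySem.List.insertBy]
    split_ifs <;>
      simp only [pvTripleOf, decide_eq_true_eq, not_lt] at * <;>
      first | rfl | omega

theorem pvFold_eq (gs : List (Int × Int)) : ∀ l : List (Int × Int), pvInv l →
    gs.foldl pvStepA (pvTripleOf l) = pvTripleOf (gs.foldl pvStepB l) := by
  induction gs with
  | nil => intro l _; rfl
  | cons p gs ih =>
    intro l hl
    simp only [List.foldl_cons]
    rw [pvStep_eq l p hl]
    exact ih (pvStepB l p) (pvInv_stepB l p hl)

-- the padded take-3 of l is the listed triple pvTripleOf l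
theorem pvPad_eq (l : List (Int × Int)) :
    (l.take 3) ++ List.replicate (3 - (l.take 3).length) ((-1 : Int), (-1 : Int)) =
      [(pvTripleOf l).1, (pvTripleOf l).2.1, (pvTripleOf l).2.2] := by
  rcases l with _ | ⟨x, _ | ⟨y, _ | ⟨z, rest⟩⟩⟩ <;> simp [pvTripleOf, List.replicate]

def pvGap (st en : List Int) (i : Int) : Int :=
  if i == 0 then PySem.List.pyGetD st i 0 - 0
  else PySem.List.pyGetD st i 0 - PySem.List.pyGetD en (i - 1) 0

def pvG (st en : List Int) (i : Int) : Int × Int := (pvGap st en i, i)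

theorem pvAB_eq (eventTime : Int) (startTime : List Int) (endTime : List Int) :
    make_top_three eventTime startTime endTime = make_top_three_alt eventTime startTime endTime := by
  have hA : make_top_three eventTime startTime endTime =
      [(((PySem.List.pyRange 0 (((startTime ++ [eventTime]).length : Nat) : Int) 1).map
          (pvG (startTime ++ [eventTime]) (endTime ++ [eventTime]))).foldl pvStepA (pvTripleOf [])).1,
       (((PySem.List.pyRange 0 (((startTime ++ [eventTime]).length : Nat) : Int) 1).map
          (pvG (startTime ++ [eventTime]) (endTime ++ [eventTime]))).foldl pvStepA (pvTripleOf [])).2.1,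
       (((PySem.List.pyRange 0 (((startTime ++ [eventTime]).length : Nat) : Int) 1).map
          (pvG (startTime ++ [eventTime]) (endTime ++ [eventTime]))).foldl pvStepA (pvTripleOf [])).2.2] := by
    rw [List.foldl_map]
    rfl
  have hgaps : (PySem.List.pyRange 0 (((startTime ++ [eventTime]).length : Nat) : Int) 1).foldl
      (fun acc i => acc ++ [pvG (startTime ++ [eventTime]) (endTime ++ [eventTime]) i]) [] =
      (PySem.List.pyRange 0 (((startTime ++ [eventTime]).length : Nat) : Int) 1).map
        (pvG (startTime ++ [eventTime]) (endTime ++ [eventTime])) := by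
    rw [PySem.List.foldl_append_eq_flatMap, List.nil_append, ← List.map_eq_flatMap]
  have hB : make_top_three_alt eventTime startTime endTime =
      (let cands := (PySem.List.sorted
          (((PySem.List.pyRange 0 (((startTime ++ [eventTime]).length : Nat) : Int) 1).map
            (pvG (startTime ++ [eventTime]) (endTime ++ [eventTime]))).filter
              (fun p => decide (p.1 > -1)))
          (fun p => (-p.1 : Int)) false).take 3
       cands ++ List.replicate (3 - cands.length) ((-1 : Int), (-1 : Int))) := by
    rw [← hgaps]
    rfl
  have hsortB : PySem.List.sorted
      (((PySem.List.pyRange 0 (((startTime ++ [eventTime]).length : Nat) : Int) 1).map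
        (pvG (startTime ++ [eventTime]) (endTime ++ [eventTime]))).filter
          (fun p => decide (p.1 > -1)))
      (fun p => (-p.1 : Int)) false =
      ((PySem.List.pyRange 0 (((startTime ++ [eventTime]).length : Nat) : Int) 1).map
        (pvG (startTime ++ [eventTime]) (endTime ++ [eventTime]))).foldl pvStepB [] := by
    rw [PySem.List.sorted_eq_foldl_insertBy, List.foldl_filter]
    refine List.foldl_ext _ _ _ ?_
    intro acc p _
    by_cases hp : p.1 > -1 <;> simp [pvStepB, hp]
  rw [hA, hB, hsortB,
    pvFold_eq ((PySem.List.pyRange 0 (((startTime ++ [eventTime]).length : Nat) : Int) 1).map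
      (pvG (startTime ++ [eventTime]) (endTime ++ [eventTime]))) [] ⟨by simp, by simp⟩,
    ← pvPad_eq]

-- ===== VERDICT (by name: the statement is the Claim_ definition above) =====
theorem make_top_three_spec : Claim_equal_make_top_three := by
  intro eventTime startTime endTime _ _
  exact pvAB_eq eventTime startTime endTime
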